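-- pv_equiv track=rewrite | github.com/fteixeira-c-arlo/AllForTheWin | models/camera_models.py | format_supported_connections
-- ===== SOURCE A (Python) =====
-- def format_supported_connections(supported: list[str] | None) -> str:
--     """Human-readable connection list, e.g. 'ADB · SSH · UART'."""
--     if not supported:
--         return "—"
--     order = ("UART", "ADB", "SSH")
--     seen = {x.upper() for x in supported}
--     parts = [x for x in order if x in seen]
--     for x in supported:
--         u = x.upper()
--         if u not in parts and u in ("UART", "ADB", "SSH"):
--             parts.append(u)
--     return " · ".join(parts) if parts else " · ".join(supported)
-- ===== SOURCE B (Python) =====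
-- _TABLE = ("", "SSH", "ADB", "ADB · SSH", "UART", "UART · SSH", "UART · ADB", "UART · ADB · SSH")
--
-- def format_supported_connections(supported: list[str] | None) -> str:
--     """Human-readable connection list, e.g. 'ADB · SSH · UART'."""
--     if not supported:
--         return "—"
--     has_uart = has_adb = has_ssh = False
--     for x in supported:
--         t = x.upper()
--         has_uart = has_uart or t == "UART"
--         has_adb = has_adb or t == "ADB"
--         has_ssh = has_ssh or t == "SSH"
--     idx = 4 * has_uart + 2 * has_adb + has_ssh
--     return _TABLE[idx] if idx else " · ".join(supported)
-- ===== Notes on version B (the rewrite author's own statement) =====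
-- stated objective: alternative
-- what changed: B keeps no collection at all: one pass sets three boolean flags (UART/ADB/SSH seen), packs them into a 0-7 index and returns a precomputed 8-entry lookup-table string, whereas A builds an uppercased set, filters the fixed-order tuple against it, runs a second membership loop and joins the parts list.
import Mathlib
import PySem

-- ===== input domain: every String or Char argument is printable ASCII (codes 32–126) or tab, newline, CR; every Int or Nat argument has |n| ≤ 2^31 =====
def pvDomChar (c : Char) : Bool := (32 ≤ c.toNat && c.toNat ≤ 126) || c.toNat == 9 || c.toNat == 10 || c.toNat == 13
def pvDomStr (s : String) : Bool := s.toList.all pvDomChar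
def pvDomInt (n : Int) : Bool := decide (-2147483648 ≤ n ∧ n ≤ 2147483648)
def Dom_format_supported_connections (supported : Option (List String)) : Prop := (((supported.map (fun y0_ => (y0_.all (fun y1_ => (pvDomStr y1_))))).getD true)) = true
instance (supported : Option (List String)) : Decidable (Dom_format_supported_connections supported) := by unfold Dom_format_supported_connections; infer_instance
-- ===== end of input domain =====

-- B keeps no collection: one pass sets three boolean flags and a precomputed 8-entry table
-- indexed by the flag bitmask yields the result (alternative decomposition, same cost).


-- ===== PORT A =====
def format_supported_connections (supported : Option (List String)) : String :=
  match supported with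
  | none => "—"
  | some xs =>
    if xs = [] then "—"
    else
      let order : List String := ["UART", "ADB", "SSH"]
      let seen : PySem.Set String := PySem.Set.ofList (xs.map PySem.Str.upper)
      let parts : List String := order.filter (fun x => PySem.Set.contains seen x)
      let parts : List String := xs.foldl (fun p x =>
        let u := PySem.Str.upper x
        if u ∉ p ∧ u ∈ (["UART", "ADB", "SSH"] : List String) then p ++ [u] else p) parts
      if parts ≠ [] then PySem.Str.join " · " parts else PySem.Str.join " · " xs

-- ===== PORT B =====
def fscTable : List String :=
  ["", "SSH", "ADB", "ADB · SSH", "UART", "UART · SSH", "UART · ADB", "UART · ADB · SSH"]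

-- pyGet? is exact; idx is always in [0,7] so the .getD "" default is never reached
def format_supported_connections_alt (supported : Option (List String)) : String :=
  match supported with
  | none => "—"
  | some xs =>
    if xs = [] then "—"
    else
      let flags : Bool × Bool × Bool := xs.foldl (fun (f : Bool × Bool × Bool) x =>
        let t := PySem.Str.upper x
        (f.1 || (t == "UART"), f.2.1 || (t == "ADB"), f.2.2 || (t == "SSH")))
        (false, false, false)
      let idx : Int := 4 * (if flags.1 then 1 else 0) + 2 * (if flags.2.1 then 1 else 0)
        + (if flags.2.2 then 1 else 0)
      if idx ≠ 0 then (PySem.List.pyGet? fscTable idx).getD "" else PySem.Str.join " · " xs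

-- ===== PRECONDITION & SPEC =====
def Spec_format_supported_connections (supported : Option (List String)) (out : String) : Prop := out = format_supported_connections_alt supported
instance (supported : Option (List String)) (out : String) : Decidable (Spec_format_supported_connections supported out) := by unfold Spec_format_supported_connections; infer_instance

-- ===== CLAIM (what is proved, stated in full; the proofs are below) =====
def Claim_equal_format_supported_connections : Prop := ∀ (supported : Option (List String)), Dom_format_supported_connections supported → Spec_format_supported_connections supported (format_supported_connections supported)

-- ===== LEMMAS AND PROOFS =====

-- A's second loop never appends: every recognized uppercased token is already in parts.
theorem fscFoldA_id (l : List String) (p : List String)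
    (h : ∀ x ∈ l, PySem.Str.upper x ∈ (["UART", "ADB", "SSH"] : List String) →
      PySem.Str.upper x ∈ p) :
    l.foldl (fun p x =>
      let u := PySem.Str.upper x
      if u ∉ p ∧ u ∈ (["UART", "ADB", "SSH"] : List String) then p ++ [u] else p) p = p := by
  induction l with
  | nil => rfl
  | cons x l ih =>
    have hx := h x (by simp)
    simp only [List.foldl_cons]
    rw [if_neg (by tauto)]
    exact ih (fun y hy => h y (by simp [hy]))

theorem fscBeqComm (a b : String) : (a == b) = decide (b = a) := by
  by_cases h : a = b
  · simp [h]
  · have h2 : ¬ b = a := fun hh => h hh.symm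
    simp [h, h2]

-- B's flag fold computes the three membership booleans.
theorem fscFoldB (xs : List String) (u a s : Bool) :
    xs.foldl (fun (f : Bool × Bool × Bool) x =>
        let t := PySem.Str.upper x
        (f.1 || (t == "UART"), f.2.1 || (t == "ADB"), f.2.2 || (t == "SSH")))
      (u, a, s) =
    (u || decide ("UART" ∈ xs.map PySem.Str.upper),
     a || decide ("ADB" ∈ xs.map PySem.Str.upper),
     s || decide ("SSH" ∈ xs.map PySem.Str.upper)) := by
  induction xs generalizing u a s with
  | nil => simp
  | cons x xs ih =>
    simp only [List.foldl_cons, List.map_cons, List.mem_cons, ih]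
    simp [Bool.or_assoc, fscBeqComm]

-- ===== VERDICT (by name: the statement is the Claim_ definition above) =====
theorem format_supported_connections_spec : Claim_equal_format_supported_connections := by
  unfold Claim_equal_format_supported_connections Spec_format_supported_connections
  intro supported _
  unfold format_supported_connections format_supported_connections_alt
  match supported with
  | none => rfl
  | some xs =>
    by_cases hnil : xs = []
    · simp [hnil]
    · simp only [if_neg hnil]
      rw [fscFoldA_id xs _ (by
            intro x hx hu
            simp only [List.mem_filter]
            refine ⟨hu, ?_⟩
            simp only [PySem.Set.contains_iff, PySem.Set.mem_ofList]
            exact List.mem_map_of_mem hx),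
          fscFoldB]
      have hc : ∀ t : String, PySem.Set.contains (PySem.Set.ofList (xs.map PySem.Str.upper)) t
          = decide (t ∈ xs.map PySem.Str.upper) := by
        intro t
        by_cases h : t ∈ xs.map PySem.Str.upper <;>
          simp [PySem.Set.mem_ofList, h]
      simp only [List.filter, hc]
      by_cases hU : "UART" ∈ xs.map PySem.Str.upper <;>
        by_cases hA : "ADB" ∈ xs.map PySem.Str.upper <;>
        by_cases hS : "SSH" ∈ xs.map PySem.Str.upper <;>
        simp [hU, hA, hS] <;> decide
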